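-- pv_equiv track=rewrite | github.com/johnpower493/Zipline-Text-to-SQL-Messenger | services/true_agentic_analyst.py | _find_groupable_column
-- ===== SOURCE A (Python) =====
-- from typing import List, Dict, Optional, Any
--
-- def _find_groupable_column(columns: List[str]) -> Optional[str]:
--     """Find a column suitable for grouping (categorical data)."""
--     # Prioritize common groupable column patterns
--     groupable_patterns = ['country', 'name', 'type', 'category', 'status', 'region', 'city', 'state']
--
--     for pattern in groupable_patterns:
--         for col in columns:
--             if pattern.lower() in col.lower():
--                 return col
--
--     # Look for columns that end with common categorical suffixes
--     categorical_suffixes = ['_type', '_status', '_category', '_name', '_code']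
--     for col in columns:
--         if any(col.lower().endswith(suffix) for suffix in categorical_suffixes):
--             return col
--
--     # Avoid numeric/id columns for grouping
--     avoid_patterns = ['id', 'count', 'total', 'amount', 'price', 'cost', 'number', 'quantity']
--     for col in columns:
--         if not any(pattern in col.lower() for pattern in avoid_patterns):
--             return col
--
--     return None
-- ===== SOURCE B (Python) =====
-- from typing import List, Optional
--
-- def _find_groupable_column(columns: List[str]) -> Optional[str]:
--     """Find a column suitable for grouping (categorical data)."""
--     groupable_patterns = ['country', 'name', 'type', 'category', 'status', 'region', 'city', 'state']
--
--     # Column-major single pass: each column's best (lowest-index) pattern rank,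
--     # then the first column achieving the minimal rank.
--     ranked = []
--     for col in columns:
--         low = col.lower()
--         rank = next((i for i, p in enumerate(groupable_patterns) if p.lower() in low), None)
--         if rank is not None:
--             ranked.append((rank, col))
--     if ranked:
--         return min(ranked, key=lambda t: t[0])[1]
--
--     categorical_suffixes = ['_type', '_status', '_category', '_name', '_code']
--     hit = next((col for col in columns
--                 if any(col.lower().endswith(s) for s in categorical_suffixes)), None)
--     if hit is not None:
--         return hit
--
--     avoid_patterns = ['id', 'count', 'total', 'amount', 'price', 'cost', 'number', 'quantity']
--     return next((col for col in columns
--                  if all(p not in col.lower() for p in avoid_patterns)), None)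
-- ===== Notes on version B (the rewrite author's own statement) =====
-- stated objective: alternative
-- what changed: Phase 1's pattern-major nested loops are replaced by a single column-major pass that ranks each column by its lowest-index matching pattern and returns the first column of minimal rank; phases 2 and 3 become next()-over-generator scans.
import Mathlib
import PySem

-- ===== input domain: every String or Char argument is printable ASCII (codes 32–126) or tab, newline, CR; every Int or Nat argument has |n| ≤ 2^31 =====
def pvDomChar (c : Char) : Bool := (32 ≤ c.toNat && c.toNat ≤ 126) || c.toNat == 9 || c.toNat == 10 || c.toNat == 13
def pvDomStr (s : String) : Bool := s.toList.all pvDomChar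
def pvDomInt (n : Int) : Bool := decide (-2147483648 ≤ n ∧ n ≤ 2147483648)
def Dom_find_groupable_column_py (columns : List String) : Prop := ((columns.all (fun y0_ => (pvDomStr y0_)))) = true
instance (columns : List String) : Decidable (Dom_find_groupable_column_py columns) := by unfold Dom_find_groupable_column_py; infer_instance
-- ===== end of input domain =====

-- B replaces A's pattern-major nested scan by one column-major pass that ranks each
-- column by its lowest-index matching pattern and picks the first column of minimal
-- rank (objective: alternative decomposition, same cost).

-- shared literal constants of both sources
def pvPatterns : List String := ["country", "name", "type", "category", "status", "region", "city", "state"]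
def pvSuffixes : List String := ["_type", "_status", "_category", "_name", "_code"]
def pvAvoid : List String := ["id", "count", "total", "amount", "price", "cost", "number", "quantity"]
-- 'pattern.lower() in col.lower()' (appears verbatim in both sources)
def pvMatch (p c : String) : Bool := PySem.Str.isIn (PySem.Str.lower p) (PySem.Str.lower c)

-- ===== PORT A =====
-- 'for pattern in patterns: for col in columns: if …: return col'
def pvA_loop1 : List String → List String → Option String
  | [], _ => none
  | p :: ps, cols =>
    match cols.find? (fun c => pvMatch p c) with
    | some c => some c
    | none => pvA_loop1 ps cols

-- 'for col in columns: if any(col.lower().endswith(suffix) …): return col'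
def pvA_loop2 : List String → Option String
  | [] => none
  | c :: rest =>
    if pvSuffixes.any (fun s => PySem.Str.endswith (PySem.Str.lower c) s) then some c
    else pvA_loop2 rest

-- 'for col in columns: if not any(pattern in col.lower() …): return col'
def pvA_loop3 : List String → Option String
  | [] => none
  | c :: rest =>
    if !(pvAvoid.any (fun p => PySem.Str.isIn p (PySem.Str.lower c))) then some c
    else pvA_loop3 rest

def find_groupable_column_py (columns : List String) : Option String :=
  match pvA_loop1 pvPatterns columns with
  | some c => some c
  | none =>
    match pvA_loop2 columns with
    | some c => some c
    | none => pvA_loop3 columns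

-- ===== PORT B =====
-- 'next((i for i, p in enumerate(groupable_patterns) if p.lower() in low), None)'
def pvB_rank? (c : String) : Option Nat := pvPatterns.findIdx? (fun p => pvMatch p c)

def find_groupable_column_py_alt (columns : List String) : Option String :=
  let ranked := columns.filterMap (fun c => (pvB_rank? c).map (fun r => (r, c)))
  match PySem.List.min? ranked (fun t => t.1) with
  | some t => some t.2
  | none =>
    match columns.find?
        (fun c => pvSuffixes.any (fun s => PySem.Str.endswith (PySem.Str.lower c) s)) with
    | some c => some c
    | none =>
      columns.find? (fun c => pvAvoid.all (fun p => !PySem.Str.isIn p (PySem.Str.lower c)))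

-- ===== PRECONDITION & SPEC =====
def Spec_find_groupable_column_py (columns : List String) (out : Option String) : Prop := out = find_groupable_column_py_alt columns
instance (columns : List String) (out : Option String) : Decidable (Spec_find_groupable_column_py columns out) := by unfold Spec_find_groupable_column_py; infer_instance

-- ===== CLAIM (what is proved, stated in full; the proofs are below) =====
def Claim_equal_find_groupable_column_py : Prop := ∀ (columns : List String), Dom_find_groupable_column_py columns → Spec_find_groupable_column_py columns (find_groupable_column_py columns)

-- ===== LEMMAS AND PROOFS =====

-- the ranked list for an arbitrary pattern list
def pvRanked (ps cols : List String) : List (Nat × String) :=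
  cols.filterMap (fun c => (List.findIdx? (fun p => pvMatch p c) ps).map (fun r => (r, c)))

-- min?'s fold, as a named step function
def pvStep {α : Type} (key : α → Nat) (acc : Option α) (y : α) : Option α :=
  match acc with
  | none => some y
  | some m => if key y < key m then some y else some m

theorem pv_min?_eq_foldl {α : Type} (l : List α) (key : α → Nat) :
    PySem.List.min? l key = l.foldl (pvStep key) none := by
  unfold PySem.List.min? pvStep
  rfl

-- the fold keeps 'some x' when nothing later beats it
theorem pv_foldl_keep {α : Type} (key : α → Nat) (x : α) (l : List α)
    (h : ∀ y ∈ l, ¬ key y < key x) :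
    l.foldl (pvStep key) (some x) = some x := by
  induction l with
  | nil => rfl
  | cons y t ih =>
    have hy : ¬ key y < key x := h y (by simp)
    rw [List.foldl_cons, show pvStep key (some x) y = some x by simp [pvStep, hy]]
    exact ih (fun z hz => h z (by simp [hz]))

-- the fold's result is the start or an element of the list
theorem pv_foldl_shape {α : Type} (key : α → Nat) (l : List α) (acc : Option α) :
    l.foldl (pvStep key) acc = acc ∨ ∃ m ∈ l, l.foldl (pvStep key) acc = some m := by
  induction l generalizing acc with
  | nil => exact Or.inl rfl
  | cons y t ih =>
    rw [List.foldl_cons]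
    rcases ih (pvStep key acc y) with h | ⟨m, hm, h⟩
    · rw [h]
      rcases acc with _ | m
      · exact Or.inr ⟨y, by simp, by simp [pvStep]⟩
      · by_cases hk : key y < key m
        · exact Or.inr ⟨y, by simp, by simp [pvStep, hk]⟩
        · exact Or.inl (by simp [pvStep, hk])
    · exact Or.inr ⟨m, by simp [hm], h⟩

-- min? returns the first element with strictly smaller key than everything before it
-- and no strictly smaller key after it
theorem pv_min?_first {α : Type} (key : α → Nat) (l1 l2 : List α) (x : α)
    (h1 : ∀ y ∈ l1, key x < key y) (h2 : ∀ y ∈ l2, ¬ key y < key x) :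
    PySem.List.min? (l1 ++ x :: l2) key = some x := by
  rw [pv_min?_eq_foldl, List.foldl_append, List.foldl_cons]
  have hmid : pvStep key (l1.foldl (pvStep key) none) x = some x := by
    rcases pv_foldl_shape key l1 none with h | ⟨m, hm, h⟩
    · rw [h]; rfl
    · rw [h]; simp [pvStep, h1 m hm]
  rw [hmid]
  exact pv_foldl_keep key x l2 h2

-- shifting every key by one commutes with min?'s fold
theorem pv_min?_shift {α : Type} (l : List (Nat × α)) :
    PySem.List.min? (l.map (fun t => (t.1 + 1, t.2))) (fun t => t.1) =
      (PySem.List.min? l (fun t => t.1)).map (fun t => (t.1 + 1, t.2)) := by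
  rw [pv_min?_eq_foldl, pv_min?_eq_foldl]
  have h : ∀ (acc : Option (Nat × α)),
      (l.map (fun t => (t.1 + 1, t.2))).foldl (pvStep (fun t => t.1))
        (acc.map (fun t => (t.1 + 1, t.2))) =
      (l.foldl (pvStep (fun t => t.1)) acc).map (fun t => (t.1 + 1, t.2)) := by
    induction l with
    | nil => intro acc; simp
    | cons y t ih =>
      intro acc
      simp only [List.map_cons, List.foldl_cons]
      rcases acc with _ | m
      · exact ih (some y)
      · simp only [Option.map_some]
        by_cases hk : y.1 < m.1
        · rw [show pvStep (fun t => t.1) (some m) y = some y by simp [pvStep, hk],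
            show pvStep (fun (t : Nat × α) => t.1) (some (m.1 + 1, m.2)) (y.1 + 1, y.2)
              = some (y.1 + 1, y.2) by simp [pvStep]; omega]
          exact ih (some y)
        · rw [show pvStep (fun t => t.1) (some m) y = some m by simp [pvStep, hk],
            show pvStep (fun (t : Nat × α) => t.1) (some (m.1 + 1, m.2)) (y.1 + 1, y.2)
              = some (m.1 + 1, m.2) by simp [pvStep]; omega]
          exact ih (some m)
  exact h none

-- main phase-1 equivalence: A's pattern-major scan = first column of minimal rank
theorem pv_phase1_eq (ps cols : List String) :
    pvA_loop1 ps cols = (PySem.List.min? (pvRanked ps cols) (fun t => t.1)).map (fun t => t.2) := by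
  induction ps generalizing cols with
  | nil =>
    have : pvRanked [] cols = [] := by
      simp [pvRanked, List.findIdx?_nil]
    simp [pvA_loop1, this, PySem.List.min?]
  | cons p ps ih =>
    rcases hf : cols.find? (fun c => pvMatch p c) with _ | c
    · -- no column matches p: all ranks shift by one
      have hnone : ∀ c ∈ cols, pvMatch p c = false := by
        intro c hc
        have := List.find?_eq_none.mp hf c hc
        simpa using this
      have hr : pvRanked (p :: ps) cols =
          (pvRanked ps cols).map (fun t => (t.1 + 1, t.2)) := by
        unfold pvRanked
        rw [List.map_filterMap]
        apply List.filterMap_congr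
        intro c hc
        rw [List.findIdx?_cons, if_neg (by simp [hnone c hc])]
        simp [Option.map_map, Function.comp_def]
      simp only [pvA_loop1, hf, ih, hr, pv_min?_shift]
      rcases PySem.List.min? (pvRanked ps cols) (fun t => t.1) with _ | t <;> rfl
    · -- c is the first column matching p: it has rank 0, everything before it rank ≥ 1
      obtain ⟨hc, l1, l2, rfl, hl1⟩ := List.find?_eq_some_iff_append.mp hf
      have hr : pvRanked (p :: ps) (l1 ++ c :: l2) =
          (pvRanked (p :: ps) l1) ++ (0, c) :: pvRanked (p :: ps) l2 := by
        unfold pvRanked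
        rw [List.filterMap_append, List.filterMap_cons]
        rw [List.findIdx?_cons, if_pos (by simpa using hc)]
        rfl
      have h1 : ∀ y ∈ pvRanked (p :: ps) l1, (0 : Nat) < y.1 := by
        intro y hy
        obtain ⟨a, ha, hfa⟩ := List.mem_filterMap.mp hy
        have hfalse : pvMatch p a = false := by
          have := hl1 a ha; simpa using this
        rw [List.findIdx?_cons, if_neg (by simp [hfalse])] at hfa
        rcases hidx : List.findIdx? (fun p => pvMatch p a) ps with _ | r
        · rw [hidx] at hfa; simp at hfa
        · rw [hidx] at hfa
          simp only [Option.map_some, Option.some.injEq] at hfa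
          rw [← hfa]; omega
      rw [pvA_loop1, hf, hr,
        pv_min?_first (fun t => t.1) _ _ (0, c) h1 (fun y _ => by simp)]
      rfl

-- phase 2: A's loop is find?
theorem pv_phase2_eq (cols : List String) :
    pvA_loop2 cols =
      cols.find? (fun c => pvSuffixes.any (fun s => PySem.Str.endswith (PySem.Str.lower c) s)) := by
  induction cols with
  | nil => rfl
  | cons c rest ih =>
    rw [pvA_loop2]
    split_ifs with h
    · exact (List.find?_cons_of_pos
        (p := fun c => pvSuffixes.any fun s => PySem.Str.endswith (PySem.Str.lower c) s) h).symm
    · rw [ih]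
      exact (List.find?_cons_of_neg
        (p := fun c => pvSuffixes.any fun s => PySem.Str.endswith (PySem.Str.lower c) s) h).symm

-- phase 3: A's loop is find?, with 'not any' turned into 'all not'
theorem pv_phase3_eq (cols : List String) :
    pvA_loop3 cols =
      cols.find? (fun c => pvAvoid.all (fun p => !PySem.Str.isIn p (PySem.Str.lower c))) := by
  induction cols with
  | nil => rfl
  | cons c rest ih =>
    simp only [← List.not_any_eq_all_not] at ih ⊢
    rw [pvA_loop3]
    split_ifs with h
    · exact (List.find?_cons_of_pos
        (p := fun c => !pvAvoid.any fun p => PySem.Str.isIn p (PySem.Str.lower c)) h).symm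
    · rw [ih]
      exact (List.find?_cons_of_neg
        (p := fun c => !pvAvoid.any fun p => PySem.Str.isIn p (PySem.Str.lower c)) h).symm

-- ===== VERDICT (by name: the statement is the Claim_ definition above) =====
theorem find_groupable_column_py_spec : Claim_equal_find_groupable_column_py := by
  intro columns _
  unfold Spec_find_groupable_column_py find_groupable_column_py find_groupable_column_py_alt
  have h1 := pv_phase1_eq pvPatterns columns
  have hrk : pvRanked pvPatterns columns =
      columns.filterMap (fun c => (pvB_rank? c).map (fun r => (r, c))) := rfl
  rw [hrk] at h1
  rw [h1, pv_phase2_eq, pv_phase3_eq]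
  rcases hm : PySem.List.min?
      (columns.filterMap (fun c => (pvB_rank? c).map (fun r => (r, c)))) (fun t => t.1)
    with _ | t <;> simp only [hm, Option.map_some, Option.map_none]
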